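-- pv_equiv track=rewrite | github.com/EnsignDaniels/CPP | src/sampler_v2.py | k_tuple_from_index
-- ===== SOURCE A (Python) =====
-- from functools import reduce
-- from operator import mul
--
-- def prod(iterable):
--     return reduce(mul, iterable, 1)
--
-- def first_digit_in_k_tuple_from_index(digits,M,k,idx):
--     in_row = prod(M-1-i for i in range(k-1))
--     first = digits[idx // in_row]
--     return first, idx % in_row
--
-- def k_tuple_from_index(M,k,idx):
--     digits = list(range(1,M+1))
--     result = []
--     for pos in range(k):
--         dgt, idx = first_digit_in_k_tuple_from_index(digits, M, k, idx)
--         result.append(dgt)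
--         digits.remove(dgt)
--         M -= 1
--         k -= 1
--     return tuple(result)
-- ===== SOURCE B (Python) =====
-- def k_tuple_from_index(M, k, idx):
--     # Least-significant-first decoding: peel the ranks off idx with growing
--     # moduli M-k+1, ..., M (no falling-factorial product is ever formed), then
--     # turn each rank r into the (r+1)-th unused digit by bumping r+1 past the
--     # previously chosen digits, kept in a small sorted list -- no M-element
--     # digit list, no remove/pop.
--     ranks = []
--     for j in range(k):
--         base = M - k + 1 + j
--         ranks.append(idx % base)
--         idx //= base
--     ranks.reverse()
--     result = []
--     used = []  # chosen digits, kept sorted ascending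
--     for r in ranks:
--         d = r + 1
--         i = 0
--         while i < len(used) and used[i] <= d:
--             d += 1
--             i += 1
--         used.insert(i, d)
--         result.append(d)
--     return tuple(result)
-- ===== Notes on version B (the rewrite author's own statement) =====
-- stated objective: faster
-- what changed: A recomputes a k-term falling-factorial product each step and removes the chosen digit by value from an M-element list; B never forms that product: it peels the ranks off idx least-significant-first with the growing moduli M-k+1..M and then turns each rank into the (rank+1)-th unused digit by bumping it past a small sorted list of the digits already chosen, with no M-element digit list at all.
-- outside the precondition, e.g. on k_tuple_from_index(3, 2, -1): A returns (3, 2), B returns (3, 2); on k_tuple_from_index(2, 3, 0): A raises ZeroDivisionError, B raises ZeroDivisionError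
import Mathlib
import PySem

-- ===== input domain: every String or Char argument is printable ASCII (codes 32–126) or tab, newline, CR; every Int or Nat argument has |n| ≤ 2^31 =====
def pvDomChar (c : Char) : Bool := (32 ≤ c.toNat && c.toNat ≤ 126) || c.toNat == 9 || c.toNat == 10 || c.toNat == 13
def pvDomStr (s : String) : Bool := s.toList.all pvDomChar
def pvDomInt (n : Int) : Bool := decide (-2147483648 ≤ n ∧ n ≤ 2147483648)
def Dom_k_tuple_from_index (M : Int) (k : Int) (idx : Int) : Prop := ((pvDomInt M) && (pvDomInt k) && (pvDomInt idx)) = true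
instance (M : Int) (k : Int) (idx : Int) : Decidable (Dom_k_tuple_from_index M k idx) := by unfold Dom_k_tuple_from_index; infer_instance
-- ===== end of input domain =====

-- B replaces A's per-step falling-factorial product and remove-by-value on an M-element
-- digit list with a least-significant-first extraction by growing moduli (no product is
-- ever formed) followed by a bump-past-used rank decoding over a small sorted list of the
-- chosen digits; a timing run is what decides any speed label. Return value only.

-- ===== PORT A =====
def pvProdA (l : List Int) : Int := l.foldl (· * ·) 1

def pvFirstDigitA (digits : List Int) (M k idx : Int) : Option (Int × Int) :=
  let in_row := pvProdA ((PySem.List.pyRange 0 (k-1) 1).map (fun i => M - 1 - i))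
  match PySem.Int.floordiv? idx in_row with
  | none => none     -- ZeroDivisionError
  | some q =>
    match PySem.List.pyGet? digits q with
    | none => none   -- IndexError
    | some first => some (first, PySem.Int.mod idx in_row)

def pvLoopA : Nat → List Int → Int → Int → Int → List Int → Option (List Int)
  | 0, _, _, _, _, res => some res
  | n+1, digits, M, k, idx, res =>
    match pvFirstDigitA digits M k idx with
    | none => none
    | some (dgt, idx') =>
      match PySem.List.remove? digits dgt with
      | none => none   -- ValueError
      | some digits' => pvLoopA n digits' (M-1) (k-1) idx' (res ++ [dgt])

def k_tuple_from_index (M : Int) (k : Int) (idx : Int) : List Int :=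
  (pvLoopA k.toNat (PySem.List.pyRange 1 (M+1) 1) M k idx []).getD []

-- ===== PORT B =====
-- phase 1 of Source B: for j in range(k): base = M-k+1+j; ranks.append(idx % base); idx //= base
def pvExtractLoopB (M k : Int) : Nat → Int → Int → List Int → Option (List Int)
  | 0, _, _, ranks => some ranks
  | n+1, j, idx, ranks =>
    let base := M - k + 1 + j
    match PySem.Int.divmod? idx base with
    | none => none   -- ZeroDivisionError
    | some (q, r) => pvExtractLoopB M k n (j+1) q (ranks ++ [r])

-- Source B's inner while loop (bump d past the ≤-prefix of the sorted 'used') fused with the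
-- 'used.insert(i, d)' that follows it: returns (final d, used with d inserted).
def pvBumpB : List Int → Int → (Int × List Int)
  | [], d => (d, [d])
  | c :: cs, d =>
    if c ≤ d then
      let p := pvBumpB cs (d+1)
      (p.1, c :: p.2)
    else (d, d :: c :: cs)

-- phase 2 of Source B: for r in ranks: bump/insert, result.append(d)
def pvBuildB : List Int → List Int → List Int → List Int
  | [], _, res => res
  | r :: rs, used, res =>
    let p := pvBumpB used (r+1)
    pvBuildB rs p.2 (res ++ [p.1])

def k_tuple_from_index_alt (M : Int) (k : Int) (idx : Int) : List Int :=
  match pvExtractLoopB M k k.toNat 0 idx [] with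
  | none => []
  | some ranks => pvBuildB ranks.reverse [] []

-- ===== PRECONDITION & SPEC =====

-- pvIdxLt idx c n acc decides idx < acc * (c * (c-1) * … * (c-n+1)) with an early exit,
-- so that Pre_ is cheap to decide even for large k (see pvIdxLt_iff below).
def pvIdxLt (idx : Int) : Int → Nat → Int → Bool
  | _, 0, acc => decide (idx < acc)
  | c, n+1, acc =>
      if acc ≤ 0 then false          -- unreachable under Pre_'s guards
      else if c ≤ 0 then false       -- unreachable under Pre_'s guards
      else if idx < acc then true
      else pvIdxLt idx (c-1) n (acc * c)

-- Pre_ excludes the inputs where A raises (k > M makes the row width 0 → ZeroDivisionError;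
-- idx ≥ ff(M,k) = M*(M-1)*…*(M-k+1) → IndexError) and, for k ≥ 1, negative idx, where A's
-- returned tuple is an accident of Python's negative-index wraparound (B happens to return
-- the same value there).
def Pre_k_tuple_from_index (M : Int) (k : Int) (idx : Int) : Prop :=
  k ≤ 0 ∨ (0 < k ∧ k ≤ M ∧ 0 ≤ idx ∧ pvIdxLt idx M k.toNat 1 = true)
instance (M : Int) (k : Int) (idx : Int) : Decidable (Pre_k_tuple_from_index M k idx) := by
  unfold Pre_k_tuple_from_index; infer_instance

def pvWitness_k_tuple_from_index : Int × Int × Int := (3, 2, 4)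

def Spec_k_tuple_from_index (M : Int) (k : Int) (idx : Int) (out : List Int) : Prop := out = k_tuple_from_index_alt M k idx
instance (M : Int) (k : Int) (idx : Int) (out : List Int) : Decidable (Spec_k_tuple_from_index M k idx out) := by unfold Spec_k_tuple_from_index; infer_instance

-- ===== CLAIM (what is proved, stated in full; the proofs are below) =====
def Claim_equal_k_tuple_from_index : Prop := ∀ (M : Int) (k : Int) (idx : Int), Dom_k_tuple_from_index M k idx → Pre_k_tuple_from_index M k idx → Spec_k_tuple_from_index M k idx (k_tuple_from_index M k idx)

-- ===== LEMMAS AND PROOFS =====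

-- pvFF c n = c * (c-1) * … * (c-n+1), the falling factorial.
def pvFF : Int → Nat → Int
  | _, 0 => 1
  | c, n+1 => pvFF c n * (c - n)

-- Reference: the sequence of ranks (Lehmer code), most significant first, that A consumes.
def pvRanks : Int → Nat → Int → List Int
  | _, 0, _ => []
  | M, n+1, idx =>
      PySem.Int.floordiv idx (pvFF (M-1) n) :: pvRanks (M-1) n (PySem.Int.mod idx (pvFF (M-1) n))

-- Reference: pop-based decoding of a rank list against a shrinking digit list (A's shape).
def pvDecodeB : List Int → List Int → List Int → Option (List Int)
  | [], _, res => some res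
  | r :: rs, digits, res =>
    match PySem.List.pop? digits r with
    | none => none   -- IndexError
    | some (v, digits') => pvDecodeB rs digits' (res ++ [v])

-- ranks pointwise in range for a shrinking bound
def pvInRange : List Int → Int → Prop
  | [], _ => True
  | r :: rs, L => 0 ≤ r ∧ r < L ∧ pvInRange rs (L - 1)

theorem pvFF_pos : ∀ (n : Nat) (c : Int), (n : Int) ≤ c → 0 < pvFF c n := by
  intro n
  induction n with
  | zero => intro c _; simp [pvFF]
  | succ m ih =>
      intro c hc
      have h1 : 0 < pvFF c m := ih c (by push_cast at hc ⊢; omega)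
      have h2 : 0 < c - (m : Int) := by push_cast at hc; omega
      simpa [pvFF] using mul_pos h1 h2

theorem pvFF_shift : ∀ (n : Nat) (c : Int), pvFF c (n+1) = c * pvFF (c-1) n := by
  intro n
  induction n with
  | zero => intro c; simp [pvFF]
  | succ m ih =>
      intro c
      have := ih c
      simp only [pvFF] at this ⊢
      push_cast
      rw [this]; ring

theorem pvIdxLt_iff : ∀ (n : Nat) (c acc idx : Int), 0 < acc → (n : Int) ≤ c → 0 ≤ idx →
    (pvIdxLt idx c n acc = true ↔ idx < acc * pvFF c n) := by
  intro n
  induction n with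
  | zero => intro c acc idx hacc _ _; simp [pvIdxLt, pvFF]
  | succ m ih =>
      intro c acc idx hacc hle h0
      have hc : 0 < c := by push_cast at hle; omega
      have hffpos : 0 < pvFF c (m+1) := pvFF_pos (m+1) c hle
      rw [show pvIdxLt idx c (m+1) acc
            = if idx < acc then true else pvIdxLt idx (c-1) m (acc * c) from by
          simp [pvIdxLt, not_le.mpr hacc, not_le.mpr hc]]
      by_cases hlt : idx < acc
      · simp only [if_pos hlt, true_iff]
        calc idx < acc := hlt
          _ = acc * 1 := by ring
          _ ≤ acc * pvFF c (m+1) := by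
                exact mul_le_mul_of_nonneg_left hffpos (le_of_lt hacc)
      · rw [if_neg hlt]
        rw [ih (c-1) (acc * c) idx (by positivity) (by push_cast at hle ⊢; omega) h0]
        rw [pvFF_shift m c]
        constructor <;> intro h <;> linarith [h]

-- A's in_row: the generator product over range(k-1) is the falling factorial.
theorem prodA_eq_ff : ∀ (m : Nat) (c : Int),
    pvProdA ((PySem.List.pyRange 0 (m : Int) 1).map (fun i => c - i)) = pvFF c m := by
  intro m
  induction m with
  | zero => intro c; simp [pvProdA, PySem.List.pyRange_one_eq_nil, pvFF]
  | succ p ih =>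
      intro c
      have hr : PySem.List.pyRange 0 ((p:Int)+1) 1 = PySem.List.pyRange 0 (p:Int) 1 ++ [(p:Int)] := by
        simpa using PySem.List.pyRange_one_succ_right (a := 0) (b := (p:Int)) (by omega)
      have : ((p:Int)+1) = (((p+1 : Nat)) : Int) := by push_cast; ring
      rw [← this, hr]
      simp only [List.map_append, pvProdA, List.foldl_append, List.map_cons, List.map_nil,
        List.foldl_cons, List.foldl_nil]
      rw [show (List.foldl (· * ·) 1 (List.map (fun i => c - i) (PySem.List.pyRange 0 (p:Int) 1))) = pvFF c p from ih c]
      simp [pvFF]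

theorem pvLoopA_eq_decode : ∀ (n : Nat) (digits : List Int) (M' k' idx : Int) (res : List Int),
    k' = (n : Int) → digits.Nodup → (digits.length : Int) = M' → (n : Int) ≤ M' →
    0 ≤ idx → idx < pvFF M' n →
    pvLoopA n digits M' k' idx res = pvDecodeB (pvRanks M' n idx) digits res := by
  intro n
  induction n with
  | zero => intro digits M' k' idx res _ _ _ _ _ _; simp [pvLoopA, pvRanks, pvDecodeB]
  | succ m ih =>
      intro digits M' k' idx res hk hnd hlen hle h0 hub
      have hmle : (m : Int) ≤ M' - 1 := by push_cast at hle; omega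
      have hdpos : 0 < pvFF (M'-1) m := pvFF_pos m (M'-1) hmle
      have hin : pvProdA ((PySem.List.pyRange 0 (k'-1) 1).map (fun i => M' - 1 - i)) = pvFF (M'-1) m := by
        have : k' - 1 = (m : Int) := by push_cast at hk ⊢; omega
        rw [this]; exact prodA_eq_ff m (M'-1)
      have hub' : idx < M' * pvFF (M'-1) m := by
        rw [pvFF_shift m M'] at hub; exact hub
      set d := pvFF (M'-1) m with hd
      set q := PySem.Int.floordiv idx d with hq
      have hq0 : 0 ≤ q := by
        rw [hq, PySem.Int.floordiv_eq_ediv_of_pos hdpos]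
        exact Int.ediv_nonneg h0 (le_of_lt hdpos)
      have hqM : q < M' := by
        rw [hq, PySem.Int.floordiv_eq_ediv_of_pos hdpos]
        exact Int.ediv_lt_of_lt_mul hdpos (by linarith [hub'])
      have hqlt : q.toNat < digits.length := by omega
      have hget : PySem.List.pyGet? digits q = some digits[q.toNat] := by
        have := PySem.List.pyGet?_of_nonneg (xs := digits) (i := q) hq0
        rw [this, List.getElem?_eq_getElem hqlt]
      have hrem : PySem.List.remove? digits digits[q.toNat] = some (digits.eraseIdx q.toNat) := by
        rw [PySem.List.remove?_eq_some_erase digits digits[q.toNat] (List.getElem_mem hqlt)]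
        rw [List.Nodup.erase_getElem hnd q.toNat hqlt]
      have hmod0 : 0 ≤ PySem.Int.mod idx d := by
        rw [PySem.Int.mod_eq_emod_of_pos hdpos]; exact Int.emod_nonneg idx (ne_of_gt hdpos)
      have hmodlt : PySem.Int.mod idx d < d := by
        rw [PySem.Int.mod_eq_emod_of_pos hdpos]; exact Int.emod_lt_of_pos idx hdpos
      simp only [pvLoopA, pvFirstDigitA, hin]
      rw [show PySem.Int.floordiv? idx d = some q from by
            simp [PySem.Int.floordiv?, PySem.Int.floordiv, ne_of_gt hdpos, hq]]
      simp only [hget, hrem]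
      simp only [pvRanks, ← hd, ← hq, pvDecodeB]
      have hpop : PySem.List.pop? digits q = some (digits[q.toNat], digits.eraseIdx q.toNat) := by
        conv_lhs => rw [show q = ((q.toNat : Nat) : Int) from by omega]
        exact PySem.List.pop?_natCast digits q.toNat hqlt
      rw [hpop]
      exact ih (digits.eraseIdx q.toNat) (M'-1) (k'-1) (PySem.Int.mod idx d) (res ++ [digits[q.toNat]])
            (by push_cast at hk ⊢; omega)
            (hnd.eraseIdx _)
            (by rw [List.length_eraseIdx_of_lt hqlt]; omega)
            hmle hmod0 hmodlt

-- ranks of a valid index are pointwise in range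
theorem pvRanks_in_range : ∀ (n : Nat) (M idx : Int), 0 ≤ idx → idx < pvFF M n → (n : Int) ≤ M →
    pvInRange (pvRanks M n idx) M := by
  intro n
  induction n with
  | zero => intro M idx _ _ _; simp [pvRanks, pvInRange]
  | succ m ih =>
      intro M idx h0 hub hle
      have hmle : (m : Int) ≤ M - 1 := by push_cast at hle; omega
      have hdpos : 0 < pvFF (M-1) m := pvFF_pos m (M-1) hmle
      have hub' : idx < M * pvFF (M-1) m := by rw [pvFF_shift m M] at hub; exact hub
      refine ⟨?_, ?_, ?_⟩
      · rw [PySem.Int.floordiv_eq_ediv_of_pos hdpos]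
        exact Int.ediv_nonneg h0 (le_of_lt hdpos)
      · rw [PySem.Int.floordiv_eq_ediv_of_pos hdpos]
        exact Int.ediv_lt_of_lt_mul hdpos (by linarith [hub'])
      · exact ih (M-1) _ (by rw [PySem.Int.mod_eq_emod_of_pos hdpos]; exact Int.emod_nonneg idx (ne_of_gt hdpos))
          (by rw [PySem.Int.mod_eq_emod_of_pos hdpos]; exact Int.emod_lt_of_pos idx hdpos) hmle

-- ===== phase-1 lemmas: least-significant-first extraction produces pvRanks reversed =====

-- peeling the least significant digit off a mixed-radix number
theorem pvRanks_snoc : ∀ (n : Nat) (M idx : Int), 0 ≤ idx → idx < pvFF M (n+1) → (n : Int) + 1 ≤ M →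
    pvRanks M (n+1) idx
      = pvRanks M n (PySem.Int.floordiv idx (M - n)) ++ [PySem.Int.mod idx (M - n)] := by
  intro n
  induction n with
  | zero =>
      intro M idx h0 hub hle
      have hM : 0 < M := by push_cast at hle; omega
      have hub' : idx < M := by simpa [pvFF] using hub
      simp only [pvRanks, pvFF, Nat.cast_zero, sub_zero, List.nil_append]
      rw [PySem.Int.floordiv_eq_ediv_of_pos one_pos, PySem.Int.mod_eq_emod_of_pos hM,
        Int.ediv_one, Int.emod_eq_of_lt h0 hub']
  | succ p ih =>
      intro M idx h0 hub hle
      have hble : (0:Int) < M - ((p:Int)+1) := by push_cast at hle; omega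
      set b := M - ((p:Int)+1) with hbdef
      have hF'pos : 0 < pvFF (M-1) p := pvFF_pos p (M-1) (by push_cast at hle; omega)
      set F' := pvFF (M-1) p with hF'def
      have hFfact : pvFF (M-1) (p+1) = F' * b := by
        simp only [pvFF, hF'def, hbdef]; ring
      have hFpos : 0 < pvFF (M-1) (p+1) := by rw [hFfact]; positivity
      set F := pvFF (M-1) (p+1) with hFdef
      -- components of idx
      have hm0 : 0 ≤ PySem.Int.mod idx F := by
        rw [PySem.Int.mod_eq_emod_of_pos hFpos]; exact Int.emod_nonneg idx (ne_of_gt hFpos)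
      have hmlt : PySem.Int.mod idx F < F := by
        rw [PySem.Int.mod_eq_emod_of_pos hFpos]; exact Int.emod_lt_of_pos idx hFpos
      set m := PySem.Int.mod idx F with hmdef
      have hmE : m = idx % F := by rw [hmdef, PySem.Int.mod_eq_emod_of_pos hFpos]
      -- (a) the leading rank coincides
      have ha : PySem.Int.floordiv (PySem.Int.floordiv idx b) F' = PySem.Int.floordiv idx F := by
        rw [PySem.Int.floordiv_eq_ediv_of_pos hble, PySem.Int.floordiv_eq_ediv_of_pos hF'pos,
          PySem.Int.floordiv_eq_ediv_of_pos hFpos, Int.ediv_ediv_of_nonneg (le_of_lt hble), hFfact]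
        rw [mul_comm F' b]
      -- digit-shuffle identities
      have hmodmod : PySem.Int.mod m b = PySem.Int.mod idx b := by
        rw [PySem.Int.mod_eq_emod_of_pos hble, PySem.Int.mod_eq_emod_of_pos hble, hmE, hFfact]
        exact Int.emod_emod_of_dvd idx ⟨F', mul_comm F' b⟩
      have hmb_lt : m / b < F' := Int.ediv_lt_of_lt_mul hble (by rw [← hFfact]; exact hmlt)
      have hmb_0 : 0 ≤ m / b := Int.ediv_nonneg hm0 (le_of_lt hble)
      have hdivmod : PySem.Int.floordiv m b = PySem.Int.mod (PySem.Int.floordiv idx b) F' := by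
        rw [PySem.Int.floordiv_eq_ediv_of_pos hble, PySem.Int.floordiv_eq_ediv_of_pos hble,
          PySem.Int.mod_eq_emod_of_pos hF'pos]
        have hidx : idx = m + idx / F * F' * b := by
          have h1 := Int.ediv_add_emod idx F
          rw [← hmE] at h1
          rw [hFfact] at h1 ⊢
          linarith [h1]
        have hdb : idx / b = m / b + idx / F * F' := by
          conv_lhs => rw [hidx]
          rw [Int.add_mul_ediv_right m (idx / F * F') (ne_of_gt hble)]
        calc m / b = (m / b) % F' := (Int.emod_eq_of_lt hmb_0 hmb_lt).symm
          _ = (m / b + idx / F * F') % F' := (Int.add_mul_emod_self_right _ _ _).symm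
          _ = idx / b % F' := by rw [hdb]
      -- assemble
      have hstep : pvRanks (M-1) (p+1+1 - 1) m
          = pvRanks (M-1) p (PySem.Int.floordiv m (M-1-(p:Int))) ++ [PySem.Int.mod m (M-1-(p:Int))] := by
        exact ih (M-1) m hm0 (by rw [← hFdef]; exact hmlt) (by push_cast at hle ⊢; omega)
      have hb_eq : M - 1 - (p:Int) = b := by rw [hbdef]; ring
      rw [hb_eq] at hstep
      show PySem.Int.floordiv idx F :: pvRanks (M-1) (p+1) m
          = (PySem.Int.floordiv (PySem.Int.floordiv idx b) F'
              :: pvRanks (M-1) p (PySem.Int.mod (PySem.Int.floordiv idx b) F'))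
            ++ [PySem.Int.mod idx b]
      rw [ha, ← hdivmod, ← hmodmod]
      simpa using hstep

theorem pvExtract_eq (M k : Int) : ∀ (n : Nat) (j idx : Int) (ranks : List Int),
    j = k - (n : Int) → (n : Int) ≤ M → 0 ≤ idx → idx < pvFF M n →
    pvExtractLoopB M k n j idx ranks = some (ranks ++ (pvRanks M n idx).reverse) := by
  intro n
  induction n with
  | zero => intro j idx ranks _ _ _ _; simp [pvExtractLoopB, pvRanks]
  | succ n ih =>
      intro j idx ranks hj hle h0 hub
      have hbpos : (0:Int) < M - (n:Int) := by push_cast at hle; omega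
      have hbase : M - k + 1 + j = M - (n:Int) := by push_cast at hj ⊢; omega
      have hq0 : 0 ≤ PySem.Int.floordiv idx (M - (n:Int)) := by
        rw [PySem.Int.floordiv_eq_ediv_of_pos hbpos]
        exact Int.ediv_nonneg h0 (le_of_lt hbpos)
      have hqlt : PySem.Int.floordiv idx (M - (n:Int)) < pvFF M n := by
        rw [PySem.Int.floordiv_eq_ediv_of_pos hbpos]
        refine Int.ediv_lt_of_lt_mul hbpos ?_
        have : pvFF M (n+1) = pvFF M n * (M - (n:Int)) := by simp [pvFF]
        rw [mul_comm]; rw [this] at hub; linarith [hub]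
      have hdm : PySem.Int.divmod? idx (M - (n:Int))
          = some (PySem.Int.floordiv idx (M - (n:Int)), PySem.Int.mod idx (M - (n:Int))) := by
        simp [PySem.Int.divmod?, ne_of_gt hbpos, PySem.Int.floordiv, PySem.Int.mod]
      simp only [pvExtractLoopB, hbase, hdm]
      rw [ih (j+1) _ (ranks ++ [PySem.Int.mod idx (M - (n:Int))]) (by omega) (by omega) hq0 hqlt]
      rw [pvRanks_snoc n M idx h0 hub (by omega)]
      simp

-- ===== phase-2 lemmas: bump decoding equals pop decoding =====

-- countP (· ≤ e) over the full digit range 1..M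
theorem countP_le_pyRange (M e : Int) (h0 : 0 ≤ e) (hM : e ≤ M) :
    (PySem.List.pyRange 1 (M+1) 1).countP (fun x => decide (x ≤ e)) = e.toNat := by
  rw [PySem.List.pyRange_one_append 1 (e+1) (M+1) (by omega) (by omega), List.countP_append]
  have h1 : (PySem.List.pyRange 1 (e+1) 1).countP (fun x => decide (x ≤ e))
      = (PySem.List.pyRange 1 (e+1) 1).length := by
    refine List.countP_eq_length.mpr ?_
    intro x hx
    rcases (PySem.List.mem_pyRange_one).mp hx with ⟨_, hxu⟩
    simp; omega
  have h2 : (PySem.List.pyRange (e+1) (M+1) 1).countP (fun x => decide (x ≤ e)) = 0 := by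
    refine List.countP_eq_zero.mpr ?_
    intro x hx
    rcases (PySem.List.mem_pyRange_one).mp hx with ⟨hxl, _⟩
    simp; omega
  rw [h1, h2, PySem.List.length_pyRange_one]
  omega

-- in a strictly increasing list, the element with i+1 predecessors-or-self at position i
theorem sorted_getElem_of_countP : ∀ (l : List Int), List.Pairwise (· < ·) l →
    ∀ (e : Int), e ∈ l → ∀ (i : Nat) (h : i < l.length),
    l.countP (fun x => decide (x ≤ e)) = i + 1 → l[i] = e := by
  intro l
  induction l with
  | nil => intro _ e he; simp at he
  | cons x xs ih =>
      intro hp e he i h hcnt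
      rcases List.pairwise_cons.mp hp with ⟨hx, hxs⟩
      by_cases hxe : x ≤ e
      · rw [List.countP_cons, if_pos (by simpa using hxe)] at hcnt
        cases i with
        | zero =>
            have hc0 : xs.countP (fun z => decide (z ≤ e)) = 0 := by omega
            rcases List.mem_cons.mp he with he | he
            · simpa using he.symm
            · exfalso
              have : 0 < xs.countP (fun z => decide (z ≤ e)) :=
                List.countP_pos_iff.mpr ⟨e, he, by simp⟩
              omega
        | succ i' =>
            have hcxs : xs.countP (fun z => decide (z ≤ e)) = i' + 1 := by omega
            have hexs : e ∈ xs := by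
              rcases List.mem_cons.mp he with he | he
              · exfalso
                have hpos : 0 < xs.countP (fun z => decide (z ≤ e)) := by omega
                rcases List.countP_pos_iff.mp hpos with ⟨y, hy, hye⟩
                have := hx y hy
                simp at hye
                omega
              · exact he
            have hlt : i' < xs.length := by
              have := List.countP_le_length (p := fun z => decide (z ≤ e)) (l := xs)
              omega
            simpa using ih hxs e hexs i' hlt hcxs
      · exfalso
        rcases List.mem_cons.mp he with he | he
        · exact hxe (le_of_eq he.symm)
        · exact hxe (le_of_lt (hx e he))

theorem pvBumpB_spec : ∀ (used : List Int) (d : Int), List.Pairwise (· < ·) used →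
    d ≤ (pvBumpB used d).1 ∧ (pvBumpB used d).1 ∉ used ∧
    (pvBumpB used d).1 = d + (used.countP (fun c => decide (c ≤ (pvBumpB used d).1)) : Int) ∧
    List.Pairwise (· < ·) (pvBumpB used d).2 ∧ (pvBumpB used d).2.Perm ((pvBumpB used d).1 :: used) := by
  intro used
  induction used with
  | nil => intro d _; simp [pvBumpB]
  | cons c cs ih =>
      intro d hp
      rcases List.pairwise_cons.mp hp with ⟨hc, hcs⟩
      by_cases hcd : c ≤ d
      · have hred1 : (pvBumpB (c :: cs) d).1 = (pvBumpB cs (d+1)).1 := by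
          simp [pvBumpB, if_pos hcd]
        have hred2 : (pvBumpB (c :: cs) d).2 = c :: (pvBumpB cs (d+1)).2 := by
          simp [pvBumpB, if_pos hcd]
        obtain ⟨h1, h2, h3, h4, h5⟩ := ih (d+1) hcs
        rw [hred1, hred2]
        refine ⟨by omega, ?_, ?_, ?_, ?_⟩
        · intro hm
          rcases List.mem_cons.mp hm with hm | hm
          · omega
          · exact h2 hm
        · rw [List.countP_cons, if_pos (by simp; omega)]
          push_cast
          omega
        · refine List.pairwise_cons.mpr ⟨?_, h4⟩
          intro y hy
          have : y ∈ (pvBumpB cs (d+1)).1 :: cs := h5.mem_iff.mp hy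
          rcases List.mem_cons.mp this with h | h
          · omega
          · exact hc y h
        · exact (h5.cons c).trans (List.Perm.swap _ c cs)
      · have hred1 : (pvBumpB (c :: cs) d).1 = d := by simp [pvBumpB, if_neg hcd]
        have hred2 : (pvBumpB (c :: cs) d).2 = d :: c :: cs := by simp [pvBumpB, if_neg hcd]
        rw [hred1, hred2]
        refine ⟨le_refl d, ?_, ?_, ?_, List.Perm.refl _⟩
        · intro hm
          rcases List.mem_cons.mp hm with hm | hm
          · omega
          · have := hc d hm; omega
        · have : (c :: cs).countP (fun z => decide (z ≤ d)) = 0 := by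
            refine List.countP_eq_zero.mpr ?_
            intro y hy
            rcases List.mem_cons.mp hy with hy | hy
            · simp; omega
            · have := hc y hy; simp; omega
          rw [this]; simp
        · refine List.pairwise_cons.mpr ⟨?_, hp⟩
          intro y hy
          rcases List.mem_cons.mp hy with hy | hy
          · omega
          · have := hc y hy; omega

theorem pvDecode_eq_build (M : Int) : ∀ (ranks used rem res : List Int),
    List.Pairwise (· < ·) used → List.Pairwise (· < ·) rem →
    (used ++ rem).Perm (PySem.List.pyRange 1 (M+1) 1) →
    pvInRange ranks (rem.length : Int) →
    pvDecodeB ranks rem res = some (pvBuildB ranks used res) := by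
  intro ranks
  induction ranks with
  | nil => intro used rem res _ _ _ _; simp [pvDecodeB, pvBuildB]
  | cons r rs ih =>
      intro used rem res hu hr hperm hir
      obtain ⟨hr0, hrlt, hrest⟩ := hir
      obtain ⟨hde, hnotin, hcnt, hs2, hp2⟩ := pvBumpB_spec used (r+1) hu
      set e := (pvBumpB used (r+1)).1 with he
      have hlensum : used.length + rem.length = (M+1-1).toNat := by
        have h1 := hperm.length_eq
        rw [List.length_append, PySem.List.length_pyRange_one] at h1
        exact h1
      have hlenrem : 0 < rem.length := by omega
      have hMpos : 0 < M := by omega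
      have hM1 : (M+1-1).toNat = M.toNat := by omega
      have he_le_M : e ≤ M := by
        have hcle := List.countP_le_length (l := used) (p := fun c => decide (c ≤ e))
        omega
      have h1e : 1 ≤ e := by omega
      have hcAll : ((PySem.List.pyRange 1 (M+1) 1).countP (fun x => decide (x ≤ e))) = e.toNat :=
        countP_le_pyRange M e (by omega) he_le_M
      have hsplit : used.countP (fun x => decide (x ≤ e)) + rem.countP (fun x => decide (x ≤ e)) = e.toNat := by
        have := hperm.countP_eq (fun x => decide (x ≤ e))
        rw [List.countP_append] at this
        omega
      have hcrem : (rem.countP (fun x => decide (x ≤ e)) : Int) = r + 1 := by omega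
      have hein : e ∈ rem := by
        have hmem : e ∈ used ++ rem := by
          refine hperm.mem_iff.mpr ?_
          rw [PySem.List.mem_pyRange_one]
          omega
        rcases List.mem_append.mp hmem with h | h
        · exact absurd h hnotin
        · exact h
      have hilt : r.toNat < rem.length := by omega
      have hgete : rem[r.toNat] = e := by
        refine sorted_getElem_of_countP rem hr e hein r.toNat hilt ?_
        omega
      have hpop : PySem.List.pop? rem r = some (e, rem.eraseIdx r.toNat) := by
        conv_lhs => rw [show r = ((r.toNat : Nat) : Int) from by omega]
        rw [PySem.List.pop?_natCast rem r.toNat hilt, hgete]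
      have hndrem : rem.Nodup := List.Pairwise.imp (fun h => ne_of_lt h) hr
      have hremperm : rem.Perm (e :: rem.eraseIdx r.toNat) := by
        have h1 : rem.erase e = rem.eraseIdx r.toNat := by
          rw [← hgete]
          exact List.Nodup.erase_getElem hndrem r.toNat hilt
        rw [← h1]
        exact List.perm_cons_erase hein
      have hperm' : ((pvBumpB used (r+1)).2 ++ rem.eraseIdx r.toNat).Perm
          (PySem.List.pyRange 1 (M+1) 1) := by
        exact (hp2.append_right _).trans
          ((List.perm_middle.symm).trans
            ((List.Perm.append_left used hremperm.symm).trans hperm))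
      have hsorted' : List.Pairwise (· < ·) (rem.eraseIdx r.toNat) :=
        List.Pairwise.sublist (List.eraseIdx_sublist rem r.toNat) hr
      have hlen' : ((rem.eraseIdx r.toNat).length : Int) = (rem.length : Int) - 1 := by
        rw [List.length_eraseIdx_of_lt hilt]
        omega
      simp only [pvDecodeB, pvBuildB, hpop, ← he]
      refine (ih (pvBumpB used (r+1)).2 (rem.eraseIdx r.toNat) (res ++ [e]) hs2 hsorted' hperm' ?_)
      rw [hlen']
      exact hrest

-- ===== VERDICT (by name: the statement is the Claim_ definition above) =====
theorem k_tuple_from_index_spec : Claim_equal_k_tuple_from_index := by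
  unfold Claim_equal_k_tuple_from_index
  intro M k idx _ hpre
  unfold Spec_k_tuple_from_index k_tuple_from_index k_tuple_from_index_alt
  rcases hpre with hk0 | ⟨hk, hkM, h0, hub0⟩
  · have : k.toNat = 0 := by omega
    simp [this, pvLoopA, pvExtractLoopB, pvBuildB]
  · have hM0 : 0 ≤ M := by omega
    have hub : idx < pvFF M k.toNat := by
      have := (pvIdxLt_iff k.toNat M 1 idx (by omega) (by omega) h0).mp hub0
      linarith [this]
    set digits := PySem.List.pyRange 1 (M+1) 1 with hdig
    have hlen : (digits.length : Int) = M := by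
      rw [hdig, PySem.List.length_pyRange_one]; omega
    have hnd : digits.Nodup := by rw [hdig]; exact PySem.List.nodup_pyRange_one 1 (M+1)
    have hsorted : List.Pairwise (· < ·) digits := by
      rw [hdig]; exact PySem.List.pairwise_lt_pyRange_one 1 (M+1)
    have hkcast : k = (k.toNat : Int) := by omega
    have hA : pvLoopA k.toNat digits M k idx [] = pvDecodeB (pvRanks M k.toNat idx) digits [] :=
      pvLoopA_eq_decode k.toNat digits M k idx [] hkcast hnd hlen (by omega) h0 hub
    have hExt : pvExtractLoopB M k k.toNat 0 idx [] = some (([] : List Int) ++ (pvRanks M k.toNat idx).reverse) :=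
      pvExtract_eq M k k.toNat 0 idx [] (by omega) (by omega) h0 hub
    have hDec : pvDecodeB (pvRanks M k.toNat idx) digits [] = some (pvBuildB (pvRanks M k.toNat idx) [] []) := by
      refine pvDecode_eq_build M _ [] digits [] (by simp) hsorted (by rw [List.nil_append, hdig]) ?_
      rw [hlen]
      exact pvRanks_in_range k.toNat M idx h0 hub (by omega)
    rw [hA, hDec]
    rw [hExt]
    simp [List.reverse_reverse]
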